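-- pv_equiv track=rewrite | github.com/enmohsen20111975/LCT_Maintenance | services/ai_work_order_analysis_service.py | analyze_spreader_fault
-- ===== SOURCE A (Python) =====
-- def analyze_spreader_fault(short_desc: str, machine: str, bdn: str) -> str:
--     """Analyze spreader faults based on VBA logic patterns."""
--     if not short_desc:
--         return ""
--
--     d = short_desc.upper().strip()
--     causes = ""
--
--     # Check if it's spreader-related work
--     if ('SPR' in d or 'SPS' in d or 'SPREADER' in d.upper()) or (machine == "SPREADER" and bdn == "CMU"):
--         # Priority order from VBA - each check can override the previous
--
--         # Twin related (VBA checks this first in priority)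
--         if 'TWIN' in d:
--             causes = "twin"
--
--         # Telescopic related
--         if 'TELESCO' in d or 'TELESCOPIE' in d or 'TÉLESCOPIE' in d:
--             causes = "telescopic"
--
--         # Lock/Unlock related (higher priority, can override twin)
--         if any(term in d for term in ['UNLOCK', 'SIGNAL', 'LOCK', 'DEVEROUILLAGE', 'DEVERROUILLAGE', 'VERROUILLAGE']):
--             causes = "Lock/Unlock"
--
--         # Signal check (VBA has separate check for signal = Lock/Unlock)
--         if 'SIGNAL' in d:
--             causes = "Lock/Unlock"
--
--         # Bad container
--         if 'BAD CONT' in d or 'CORNER' in d: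
--             causes = "Bad contenair"
--
--         # Change spreader
--         if any(term in d for term in ['CHANGEMENT', 'REMPLACE', 'CHANGE']):
--             causes = "Change spreader"
--
--         # Flipper related (VBA checks this but twin and telescopic have higher priority)
--         if 'FLIPPER' in d or 'FLIP' in d:
--             # Only set flipper if no higher priority fault was found
--             if not causes:
--                 causes = "flipper"
--
--     return causes
-- ===== SOURCE B (Python) =====
-- # Priority-ordered rules table scanned once; first matching rule wins (flipper last).
-- _RULES = [
--     (('CHANGEMENT', 'REMPLACE', 'CHANGE'), "Change spreader"),
--     (('BAD CONT', 'CORNER'), "Bad contenair"),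
--     (('UNLOCK', 'SIGNAL', 'LOCK', 'DEVEROUILLAGE', 'DEVERROUILLAGE', 'VERROUILLAGE'), "Lock/Unlock"),
--     (('TELESCO', 'TELESCOPIE', 'TÉLESCOPIE'), "telescopic"),
--     (('TWIN',), "twin"),
--     (('FLIPPER', 'FLIP'), "flipper"),
-- ]
--
-- def analyze_spreader_fault(short_desc: str, machine: str, bdn: str) -> str:
--     if not short_desc:
--         return ""
--     d = short_desc.upper().strip()
--     if not (('SPR' in d or 'SPS' in d or 'SPREADER' in d.upper())
--             or (machine == "SPREADER" and bdn == "CMU")):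
--         return ""
--     for keywords, label in _RULES:
--         if any(k in d for k in keywords):
--             return label
--     return ""
-- ===== Notes on version B (the rewrite author's own statement) =====
-- stated objective: simpler
-- what changed: Replaced A's cascade of seven overriding assignments to `causes` by a priority-ordered rules table (keywords, label) scanned once with first-match-wins, flipper placed last so it only fires when nothing else matched.
import Mathlib
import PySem

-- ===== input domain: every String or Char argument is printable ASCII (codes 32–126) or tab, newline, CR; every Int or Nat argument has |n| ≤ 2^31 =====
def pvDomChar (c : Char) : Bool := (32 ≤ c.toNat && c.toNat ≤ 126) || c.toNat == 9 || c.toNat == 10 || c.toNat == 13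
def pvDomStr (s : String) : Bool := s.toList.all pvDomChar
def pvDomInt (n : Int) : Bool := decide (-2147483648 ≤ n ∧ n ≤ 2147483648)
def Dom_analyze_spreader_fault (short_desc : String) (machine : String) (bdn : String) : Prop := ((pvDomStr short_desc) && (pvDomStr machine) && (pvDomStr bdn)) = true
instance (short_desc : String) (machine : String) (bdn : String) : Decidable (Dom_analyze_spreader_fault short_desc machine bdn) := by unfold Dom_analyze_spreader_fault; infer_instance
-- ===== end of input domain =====

-- B replaces A's repeated-override branch cascade by a priority-ordered rules table
-- scanned once, first match wins (objective: simpler). Same return value everywhere.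

-- ===== PORT A =====
-- literal transliteration of A's cascade of overriding assignments to `causes`
def analyze_spreader_fault (short_desc : String) (machine : String) (bdn : String) : String :=
  if short_desc = "" then ""
  else
    let d := PySem.Str.strip (PySem.Str.upper short_desc)
    let causes := ""
    if (PySem.Str.isIn "SPR" d || PySem.Str.isIn "SPS" d ||
        PySem.Str.isIn "SPREADER" (PySem.Str.upper d)) ||
       (machine == "SPREADER" && bdn == "CMU") then
      let causes := if PySem.Str.isIn "TWIN" d then "twin" else causes
      let causes := if PySem.Str.isIn "TELESCO" d || PySem.Str.isIn "TELESCOPIE" d ||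
                       PySem.Str.isIn "TÉLESCOPIE" d then "telescopic" else causes
      let causes := if ["UNLOCK", "SIGNAL", "LOCK", "DEVEROUILLAGE", "DEVERROUILLAGE",
                        "VERROUILLAGE"].any (fun t => PySem.Str.isIn t d)
                    then "Lock/Unlock" else causes
      let causes := if PySem.Str.isIn "SIGNAL" d then "Lock/Unlock" else causes
      let causes := if PySem.Str.isIn "BAD CONT" d || PySem.Str.isIn "CORNER" d
                    then "Bad contenair" else causes
      let causes := if ["CHANGEMENT", "REMPLACE", "CHANGE"].any (fun t => PySem.Str.isIn t d)
                    then "Change spreader" else causes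
      let causes := if PySem.Str.isIn "FLIPPER" d || PySem.Str.isIn "FLIP" d then
                      (if causes = "" then "flipper" else causes)
                    else causes
      causes
    else causes

-- ===== PORT B =====
-- the priority-ordered rules table, highest priority first
def pvRules : List (List String × String) :=
  [ (["CHANGEMENT", "REMPLACE", "CHANGE"], "Change spreader"),
    (["BAD CONT", "CORNER"], "Bad contenair"),
    (["UNLOCK", "SIGNAL", "LOCK", "DEVEROUILLAGE", "DEVERROUILLAGE", "VERROUILLAGE"], "Lock/Unlock"),
    (["TELESCO", "TELESCOPIE", "TÉLESCOPIE"], "telescopic"),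
    (["TWIN"], "twin"),
    (["FLIPPER", "FLIP"], "flipper") ]

-- the `for … return label` loop: first rule with a matching keyword wins
def pvFirstMatch (d : String) : List (List String × String) → String
  | [] => ""
  | (kws, label) :: rest =>
      if kws.any (fun k => PySem.Str.isIn k d) then label else pvFirstMatch d rest

def analyze_spreader_fault_alt (short_desc : String) (machine : String) (bdn : String) : String :=
  if short_desc = "" then ""
  else
    let d := PySem.Str.strip (PySem.Str.upper short_desc)
    if !((PySem.Str.isIn "SPR" d || PySem.Str.isIn "SPS" d ||
          PySem.Str.isIn "SPREADER" (PySem.Str.upper d)) ||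
         (machine == "SPREADER" && bdn == "CMU")) then ""
    else pvFirstMatch d pvRules

-- ===== PRECONDITION & SPEC =====
def Spec_analyze_spreader_fault (short_desc : String) (machine : String) (bdn : String) (out : String) : Prop := out = analyze_spreader_fault_alt short_desc machine bdn
instance (short_desc : String) (machine : String) (bdn : String) (out : String) : Decidable (Spec_analyze_spreader_fault short_desc machine bdn out) := by unfold Spec_analyze_spreader_fault; infer_instance

-- ===== CLAIM (what is proved, stated in full; the proofs are below) =====
def Claim_equal_analyze_spreader_fault : Prop := ∀ (short_desc : String) (machine : String) (bdn : String), Dom_analyze_spreader_fault short_desc machine bdn → Spec_analyze_spreader_fault short_desc machine bdn (analyze_spreader_fault short_desc machine bdn)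

-- ===== LEMMAS AND PROOFS =====

-- ===== VERDICT (by name: the statement is the Claim_ definition above) =====
set_option maxHeartbeats 1000000 in
theorem analyze_spreader_fault_spec : Claim_equal_analyze_spreader_fault := by
  intro s m b _
  unfold Spec_analyze_spreader_fault analyze_spreader_fault analyze_spreader_fault_alt
  by_cases hs : s = ""
  · simp [hs]
  · simp only [hs, if_false, pvRules, pvFirstMatch, List.any_cons, List.any_nil,
      Bool.or_false, Bool.not_eq_eq_eq_not, Bool.not_true]
    by_cases hg : ((PySem.Str.isIn "SPR" (PySem.Str.strip (PySem.Str.upper s)) ||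
          PySem.Str.isIn "SPS" (PySem.Str.strip (PySem.Str.upper s)) ||
          PySem.Str.isIn "SPREADER" (PySem.Str.upper (PySem.Str.strip (PySem.Str.upper s)))) ||
         (m == "SPREADER" && b == "CMU")) = true
    · simp only [hg]
      split_ifs <;> first | rfl | simp_all
    · obtain ⟨⟨⟨h1, h2⟩, h3⟩, h4⟩ := by simpa using hg
      have h4' : ¬(m = "SPREADER" ∧ b = "CMU") := fun ⟨hm, hb⟩ => h4 hm hb
      simp [h1, h2, h3, h4']
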